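-- pv_equiv track=rewrite | github.com/erg0dic/transmon_public | src/plot_exps.py | get_hyp_exp_marker_all
-- ===== SOURCE A (Python) =====
-- from typing import List, Dict, Any, Union, Tuple
-- from itertools import zip_longest, product
--
-- def get_hyp_exp_marker_all(unique_hypers_dict: Dict) -> str:
--     all_hyp_exp_markers = []
--     hyper_params = list(unique_hypers_dict.keys())
--     hyper_param_vals = list(unique_hypers_dict.values())
--     # arbitrary depth for loop!
--     hp_enumeration = list(product(*hyper_param_vals))
--     for val_tuple in hp_enumeration:
--         hyp_exp_marker = ""
--         for i in range(len(val_tuple)):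
--             hyp_exp_marker += f"{hyper_params[i]}-{val_tuple[i]}_"
--         all_hyp_exp_markers.append(hyp_exp_marker)
--     return all_hyp_exp_markers
-- ===== SOURCE B (Python) =====
-- def get_hyp_exp_marker_all(unique_hypers_dict):
--     markers = [""]
--     for key, vals in unique_hypers_dict.items():
--         markers = [m + f"{key}-{v}_" for m in markers for v in vals]
--     return markers
-- ===== Notes on version B (the rewrite author's own statement) =====
-- stated objective: simpler
-- what changed: Replaces itertools.product plus a second indexed loop over each tuple with incremental prefix-extension: the marker list starts with a single empty prefix and each key/value-list multiplies it in one comprehension, so no tuples are materialized or re-indexed.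
import Mathlib
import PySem

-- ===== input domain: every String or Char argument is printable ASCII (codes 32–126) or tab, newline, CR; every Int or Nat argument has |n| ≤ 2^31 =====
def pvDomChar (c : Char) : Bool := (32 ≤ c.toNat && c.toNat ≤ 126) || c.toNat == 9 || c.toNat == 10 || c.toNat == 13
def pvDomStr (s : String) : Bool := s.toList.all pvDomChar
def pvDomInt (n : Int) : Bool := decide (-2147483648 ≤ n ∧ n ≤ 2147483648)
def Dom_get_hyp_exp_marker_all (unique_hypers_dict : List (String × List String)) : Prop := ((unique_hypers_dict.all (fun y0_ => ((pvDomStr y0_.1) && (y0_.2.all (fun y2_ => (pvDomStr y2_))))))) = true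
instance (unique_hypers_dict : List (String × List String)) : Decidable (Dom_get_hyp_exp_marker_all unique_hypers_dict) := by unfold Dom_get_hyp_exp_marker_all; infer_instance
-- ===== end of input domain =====

-- B builds the marker list by incremental prefix-extension per key instead of A's
-- itertools.product + indexed inner loop; objective: simpler (same cost).

-- ===== PORT A =====
-- itertools.product(*lists): first list varies slowest
def pvProd : List (List String) → List (List String)
  | [] => [[]]
  | vs :: rest => vs.flatMap (fun v => (pvProd rest).map (fun t => v :: t))

def get_hyp_exp_marker_all (unique_hypers_dict : List (String × List String)) : List String :=
  let hyper_params := unique_hypers_dict.map Prod.fst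
  let hyper_param_vals := unique_hypers_dict.map Prod.snd
  let hp_enumeration := pvProd hyper_param_vals
  -- for val_tuple in hp_enumeration: inner indexed loop builds the marker, append to accumulator
  -- (getD is exact here: i < length of both lists on every iteration, since product tuples
  -- have exactly one entry per key)
  hp_enumeration.foldl
    (fun acc val_tuple =>
      acc ++ [(List.range val_tuple.length).foldl
        (fun s i => s ++ (hyper_params.getD i "") ++ "-" ++ (val_tuple.getD i "") ++ "_") ""])
    []

-- ===== PORT B =====
def get_hyp_exp_marker_all_alt (unique_hypers_dict : List (String × List String)) : List String :=
  unique_hypers_dict.foldl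
    (fun markers kv =>
      markers.flatMap (fun m => kv.2.map (fun v => m ++ kv.1 ++ "-" ++ v ++ "_")))
    [""]

-- ===== PRECONDITION & SPEC =====
def Spec_get_hyp_exp_marker_all (unique_hypers_dict : List (String × List String)) (out : List String) : Prop := out = get_hyp_exp_marker_all_alt unique_hypers_dict
instance (unique_hypers_dict : List (String × List String)) (out : List String) : Decidable (Spec_get_hyp_exp_marker_all unique_hypers_dict out) := by unfold Spec_get_hyp_exp_marker_all; infer_instance

-- ===== CLAIM (what is proved, stated in full; the proofs are below) =====
def Claim_equal_get_hyp_exp_marker_all : Prop := ∀ (unique_hypers_dict : List (String × List String)), Dom_get_hyp_exp_marker_all unique_hypers_dict → Spec_get_hyp_exp_marker_all unique_hypers_dict (get_hyp_exp_marker_all unique_hypers_dict)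

-- ===== LEMMAS AND PROOFS =====

-- A's outer append-loop is a map
theorem pv_foldl_append_map {α β : Type} (f : α → β) :
    ∀ (l : List α) (a : List β),
      l.foldl (fun acc t => acc ++ [f t]) a = a ++ l.map f := by
  intro l
  induction l with
  | nil => intro a; simp
  | cons x xs ih => intro a; simp [List.foldl, ih]

-- zip-based inner fold
def pvZf (ps : List (String × String)) (s : String) : String :=
  ps.foldl (fun s kv => s ++ kv.1 ++ "-" ++ kv.2 ++ "_") s

-- A's index-based inner loop equals the zip fold when lengths agree
theorem pv_range_eq_zf :
    ∀ (t keys : List String) (s : String), keys.length = t.length →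
      (List.range t.length).foldl
        (fun s i => s ++ (keys.getD i "") ++ "-" ++ (t.getD i "") ++ "_") s
      = pvZf (keys.zip t) s := by
  intro t
  induction t with
  | nil => intro keys s h; simp [pvZf]
  | cons v vt ih =>
    intro keys s h
    cases keys with
    | nil => simp at h
    | cons k kt =>
      simp only [List.length_cons] at h ⊢
      rw [List.range_succ_eq_map]
      simp only [List.foldl_cons, List.foldl_map, List.getD_cons_zero, List.getD_cons_succ]
      rw [ih kt _ (by omega)]
      simp [pvZf]

-- every tuple from pvProd has one entry per input list
theorem pv_prod_len : ∀ (L : List (List String)) (t : List String),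
    t ∈ pvProd L → t.length = L.length := by
  intro L
  induction L with
  | nil => intro t ht; simp [pvProd] at ht; simp [ht]
  | cons vs rest ih =>
    intro t ht
    simp only [pvProd, List.mem_flatMap, List.mem_map] at ht
    obtain ⟨v, _, t', ht', rfl⟩ := ht
    simp [ih t' ht']

-- recursive description of the shared result
def pvBrec : List (String × List String) → String → List String
  | [], s => [s]
  | (k, vs) :: rest, s => vs.flatMap (fun v => pvBrec rest (s ++ k ++ "-" ++ v ++ "_"))

-- A-side: mapping the zip fold over the product = pvBrec
theorem pv_A_eq_brec :
    ∀ (d : List (String × List String)) (s : String),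
      (pvProd (d.map Prod.snd)).map (fun t => pvZf ((d.map Prod.fst).zip t) s)
      = pvBrec d s := by
  intro d
  induction d with
  | nil => intro s; simp [pvProd, pvBrec, pvZf]
  | cons kv rest ih =>
    intro s
    obtain ⟨k, vs⟩ := kv
    simp only [List.map_cons, pvProd, pvBrec, List.map_flatMap, List.map_map]
    refine List.flatMap_congr ?_
    intro v _
    rw [← ih (s ++ k ++ "-" ++ v ++ "_")]
    apply List.map_congr_left
    intro t _
    simp [pvZf]

-- B-side: the foldl over markers = flatMap of pvBrec
theorem pv_B_eq_brec :
    ∀ (d : List (String × List String)) (ms : List String),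
      d.foldl (fun markers kv =>
        markers.flatMap (fun m => kv.2.map (fun v => m ++ kv.1 ++ "-" ++ v ++ "_"))) ms
      = ms.flatMap (pvBrec d) := by
  intro d
  induction d with
  | nil => intro ms; simp [pvBrec]
  | cons kv rest ih =>
    intro ms
    obtain ⟨k, vs⟩ := kv
    simp only [List.foldl_cons, ih, List.flatMap_assoc]
    refine List.flatMap_congr ?_
    intro m _
    simp [pvBrec, List.flatMap_map]

-- ===== VERDICT (by name: the statement is the Claim_ definition above) =====
theorem get_hyp_exp_marker_all_spec : Claim_equal_get_hyp_exp_marker_all := by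
  unfold Claim_equal_get_hyp_exp_marker_all
  intro d _
  unfold Spec_get_hyp_exp_marker_all get_hyp_exp_marker_all get_hyp_exp_marker_all_alt
  simp only []
  rw [pv_foldl_append_map, List.nil_append, pv_B_eq_brec]
  rw [List.flatMap_cons, List.flatMap_nil, List.append_nil]
  rw [← pv_A_eq_brec d ""]
  apply List.map_congr_left
  intro t ht
  have hl : (d.map Prod.fst).length = t.length := by
    rw [List.length_map, pv_prod_len _ t ht, List.length_map]
  rw [pv_range_eq_zf t (d.map Prod.fst) "" hl]
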